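-- pv_equiv track=rewrite | github.com/BghBenja/CodeWars | Python/kyu7kata/circle_cipher.py | mine_decode
-- ===== SOURCE A (Python) =====
-- def mine_decode(s:str) -> str:
--     result = ""
--     letters = s[::-1]
--     for i in range(len(s)):
--         if i % 2 == 0:
--             result = letters[i] + result
--         else:
--             result += letters[i]
--
--     if len(s) % 2 == 0:
--         return result[::-1]
--     else:
--         return result
-- ===== SOURCE B (Python) =====
-- def mine_decode(s: str) -> str:
--     # closed-form permutation: even-index chars in order, then odd-index chars reversed
--     return s[0::2] + s[1::2][::-1]
-- ===== Notes on version B (the rewrite author's own statement) =====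
-- stated objective: faster
-- what changed: Replaces the reverse-the-string-then-loop-with-conditional-prepend/append-and-final-parity-reverse by a closed-form permutation: the even-index slice concatenated with the reversed odd-index slice, with no loop and no length-parity branch.
import Mathlib
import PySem

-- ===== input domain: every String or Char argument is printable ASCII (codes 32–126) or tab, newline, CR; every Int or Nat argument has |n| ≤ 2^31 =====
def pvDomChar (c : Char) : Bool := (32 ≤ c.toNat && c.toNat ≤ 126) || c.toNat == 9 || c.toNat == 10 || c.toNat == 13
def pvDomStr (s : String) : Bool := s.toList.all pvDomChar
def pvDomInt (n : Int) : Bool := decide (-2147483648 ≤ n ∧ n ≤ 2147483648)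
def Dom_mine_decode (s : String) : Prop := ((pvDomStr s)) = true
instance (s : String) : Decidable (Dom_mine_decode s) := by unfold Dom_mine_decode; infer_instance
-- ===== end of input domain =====

-- B computes the same reordering as a closed-form permutation (even slice ++ reversed odd
-- slice) instead of A's reverse-then-loop with conditional prepend/append; objective: simpler.

-- ===== PORT A =====
-- Strings are ported on the List Char side (PySem.Str functions are wrappers over it);
-- letters[i] is always in range (i ∈ range(len(s))), so pyGetD's default is never used.
def mine_decode (s : String) : String :=
  let letters : List Char := (PySem.List.slice? s.toList none none (-1)).getD []  -- s[::-1]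
  let result : List Char :=
    (PySem.List.pyRange 0 (PySem.Str.len s) 1).foldl
      (fun result i =>
        if PySem.Int.mod i 2 = 0 then
          PySem.List.pyGetD letters i ' ' :: result        -- result = letters[i] + result
        else
          result ++ [PySem.List.pyGetD letters i ' '])     -- result += letters[i]
      []
  if PySem.Int.mod (PySem.Str.len s) 2 = 0 then
    String.ofList ((PySem.List.slice? result none none (-1)).getD [])  -- result[::-1]
  else
    String.ofList result

-- ===== PORT B =====
def mine_decode_alt (s : String) : String :=
  let front : List Char := (PySem.List.slice? s.toList (some 0) none 2).getD []   -- s[0::2]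
  let back : List Char := (PySem.List.slice? s.toList (some 1) none 2).getD []    -- s[1::2]
  String.ofList (front ++ (PySem.List.slice? back none none (-1)).getD [])        -- + back[::-1]

-- ===== PRECONDITION & SPEC =====
def Spec_mine_decode (s : String) (out : String) : Prop := out = mine_decode_alt s
instance (s : String) (out : String) : Decidable (Spec_mine_decode s out) := by unfold Spec_mine_decode; infer_instance

-- ===== CLAIM (what is proved, stated in full; the proofs are below) =====
def Claim_equal_mine_decode : Prop := ∀ (s : String), Dom_mine_decode s → Spec_mine_decode s (mine_decode s)

-- ===== LEMMAS AND PROOFS =====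

-- characters at even positions (0,2,4,…) of a list
def pvEvens : List Char → List Char
  | [] => []
  | [a] => [a]
  | a :: _ :: t => a :: pvEvens t

-- characters at odd positions (1,3,5,…)
def pvOdds (xs : List Char) : List Char := pvEvens xs.tail

theorem pvEvens_cons (a : Char) (t : List Char) : pvEvens (a :: t) = a :: pvOdds t := by
  cases t <;> rfl

theorem pvOdds_cons (a : Char) (t : List Char) : pvOdds (a :: t) = pvEvens t := rfl

-- s[0::2] is pvEvens: first the filterMap/range normal form of slice?, then induction
theorem pvFilterMap_evens : ∀ xs : List Char,
    List.filterMap (fun k : Nat => xs[(2 * (k:Int)).toNat]?) (List.range ((xs.length+1)/2)) = pvEvens xs := by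
  intro xs
  induction xs using pvEvens.induct with
  | case1 => simp [pvEvens]
  | case2 a => simp [pvEvens]
  | case3 a b t ih =>
      have hlen : ((a :: b :: t).length + 1) / 2 = (t.length + 1) / 2 + 1 := by
        simp [List.length_cons]; omega
      rw [hlen, List.range_succ_eq_map, List.filterMap_cons, List.filterMap_map]
      have h1 : (fun k : Nat => (a :: b :: t)[(2 * (((k:Nat)+1 : Nat):Int)).toNat]?) = (fun k : Nat => t[(2 * (k:Int)).toNat]?) := by
        funext k
        have h2 : (2 * (((k:Nat)+1 : Nat):Int)).toNat = 2 + 2*k := by push_cast; omega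
        rw [h2]
        show (a :: b :: t)[2 + 2*k]? = _
        rw [show 2 + 2*k = (2*(k:Int)).toNat + 1 + 1 from by omega]
        simp
      simp only [Function.comp_def, h1]
      simp [pvEvens, ih]

theorem pvSliceE (xs : List Char) : PySem.List.slice? xs (some 0) none 2 = some (pvEvens xs) := by
  have : (PySem.List.slice? xs (some 0) none 2).getD [] = pvEvens xs := by
    simp only [PySem.List.slice?, PySem.List.sliceIndices]
    norm_num
    have hc : (if 0 < xs.length then (((xs.length:Int) + 2 - 1) / 2).toNat else 0) = (xs.length+1)/2 := by
      split_ifs <;> omega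
    rw [hc]; exact pvFilterMap_evens xs
  have h2 : (PySem.List.slice? xs (some 0) none 2).isSome := by
    simp [PySem.List.slice?]
  cases h : PySem.List.slice? xs (some 0) none 2 with
  | none => rw [h] at h2; simp at h2
  | some v => rw [h] at this; simp at this; rw [this]

theorem pvSliceO (xs : List Char) : PySem.List.slice? xs (some 1) none 2 = some (pvOdds xs) := by
  have : (PySem.List.slice? xs (some 1) none 2).getD [] = pvOdds xs := by
    simp only [PySem.List.slice?, PySem.List.sliceIndices]
    norm_num
    cases xs with
    | nil => simp [pvOdds, pvEvens]
    | cons a t =>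
        have hc : (if 1 < (a :: t).length then ((((a :: t).length:Int) - min 1 ((a :: t).length:Int) + 2 - 1) / 2).toNat else 0) = (t.length+1)/2 := by
          simp [List.length_cons]; split_ifs <;> omega
        rw [hc]
        have h1 : (fun k : Nat => (a :: t)[(min 1 (((a :: t).length:Int)) + 2 * (k:Int)).toNat]?) = (fun k : Nat => t[(2 * (k:Int)).toNat]?) := by
          funext k
          have hm : min 1 (((a :: t).length:Int)) = 1 := by rw [List.length_cons]; push_cast; omega
          rw [hm, show ((1:Int) + 2 * (k:Int)).toNat = (2*(k:Int)).toNat + 1 from by omega]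
          simp
        rw [h1, pvFilterMap_evens t]
        exact (pvOdds_cons a t).symm
  have h2 : (PySem.List.slice? xs (some 1) none 2).isSome := by
    simp [PySem.List.slice?]
  cases h : PySem.List.slice? xs (some 1) none 2 with
  | none => rw [h] at h2; simp at h2
  | some v => rw [h] at this; simp at this; rw [this]

-- appending one element: which half it lands in depends on the length's parity
theorem pvApp : ∀ (xs : List Char) (a : Char),
    pvEvens (xs ++ [a]) = (if xs.length % 2 = 0 then pvEvens xs ++ [a] else pvEvens xs) ∧
    pvOdds (xs ++ [a]) = (if xs.length % 2 = 0 then pvOdds xs else pvOdds xs ++ [a]) := by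
  intro xs
  induction xs using pvEvens.induct with
  | case1 => intro a; simp [pvEvens, pvOdds]
  | case2 b => intro a; simp [pvEvens, pvOdds]
  | case3 b c t ih =>
      intro a
      have hlen : (b :: c :: t).length % 2 = t.length % 2 := by simp [List.length_cons]; omega
      obtain ⟨ih1, ih2⟩ := ih a
      constructor
      · show pvEvens (b :: c :: (t ++ [a])) = _
        rw [pvEvens_cons, pvOdds_cons, ih1, hlen, pvEvens_cons, pvOdds_cons]
        split_ifs <;> simp
      · show pvOdds (b :: c :: (t ++ [a])) = _
        rw [pvOdds_cons, pvEvens_cons, ih2, hlen, pvOdds_cons, pvEvens_cons]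
        split_ifs <;> simp

-- evens/odds of the reversed list, by the length's parity
theorem pvRev : ∀ l : List Char,
    pvEvens l.reverse = (if l.length % 2 = 0 then pvOdds l else pvEvens l).reverse ∧
    pvOdds l.reverse = (if l.length % 2 = 0 then pvEvens l else pvOdds l).reverse := by
  intro l
  induction l with
  | nil => simp [pvEvens, pvOdds]
  | cons a t ih =>
      obtain ⟨ih1, ih2⟩ := ih
      have hrev : (a :: t).reverse = t.reverse ++ [a] := by simp
      obtain ⟨ha1, ha2⟩ := pvApp t.reverse a
      rw [List.length_reverse] at ha1 ha2
      have hlen : (a :: t).length % 2 = (t.length + 1) % 2 := by simp [List.length_cons]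
      by_cases ht : t.length % 2 = 0
      · constructor
        · rw [hrev, ha1, if_pos ht, ih1, if_pos ht, hlen, if_neg (by omega), pvEvens_cons]
          simp
        · rw [hrev, ha2, if_pos ht, ih2, if_pos ht, hlen, if_neg (by omega), pvOdds_cons]
      · constructor
        · rw [hrev, ha1, if_neg ht, ih1, if_neg ht, hlen, if_pos (by omega), pvOdds_cons]
        · rw [hrev, ha2, if_neg ht, ih2, if_neg ht, hlen, if_pos (by omega), pvEvens_cons]
          simp

-- A's loop over enumerate: prepended chars are the even-indexed ones, appended the odd-indexed
theorem pvLoop : ∀ (l : List Char) (s : Int) (r : List Char), 0 ≤ s →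
    (PySem.List.enumerate l s).foldl
      (fun r p => if PySem.Int.mod p.1 2 = 0 then p.2 :: r else r ++ [p.2]) r =
    if PySem.Int.mod s 2 = 0 then (pvEvens l).reverse ++ r ++ pvOdds l
    else (pvOdds l).reverse ++ r ++ pvEvens l := by
  intro l
  induction l with
  | nil => intro s r hs; simp [PySem.List.enumerate_nil, pvEvens, pvOdds]
  | cons a t ih =>
      intro s r hs
      rw [PySem.List.enumerate_cons, List.foldl_cons, ih (s+1) _ (by omega)]
      rw [PySem.Int.mod_eq_emod_of_pos (by norm_num), PySem.Int.mod_eq_emod_of_pos (by norm_num)]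
      by_cases hp : s % 2 = 0
      · rw [if_pos hp, if_pos hp, if_neg (by omega), pvEvens_cons, pvOdds_cons]
        simp
      · rw [if_neg hp, if_neg hp, if_pos (by omega), pvEvens_cons, pvOdds_cons]
        simp

theorem pvParity (s : String) :
    (PySem.Int.mod (PySem.Str.len s) 2 = 0) ↔ s.toList.length % 2 = 0 := by
  rw [PySem.Int.mod_eq_emod_of_pos (by norm_num), PySem.Str.len_eq]
  omega

-- ===== VERDICT (by name: the statement is the Claim_ definition above) =====
theorem mine_decode_spec : Claim_equal_mine_decode := by
  intro s _
  unfold Spec_mine_decode mine_decode mine_decode_alt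
  simp only [PySem.List.slice?_none_none_neg_one, pvSliceE, pvSliceO, Option.getD_some]
  -- turn the index loop into a fold over enumerate
  have hlen : PySem.Str.len s = PySem.List.len s.toList.reverse := by
    simp [PySem.Str.len_eq, PySem.List.len]
  have hloop :
      (PySem.List.pyRange 0 (PySem.Str.len s) 1).foldl
        (fun result i =>
          if PySem.Int.mod i 2 = 0 then
            PySem.List.pyGetD s.toList.reverse i ' ' :: result
          else
            result ++ [PySem.List.pyGetD s.toList.reverse i ' ']) [] =
      (PySem.List.enumerate s.toList.reverse 0).foldl
        (fun r p => if PySem.Int.mod p.1 2 = 0 then p.2 :: r else r ++ [p.2]) [] := by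
    rw [hlen, PySem.List.enumerate_eq_map_pyRange s.toList.reverse ' ', List.foldl_map]
  rw [hloop, pvLoop _ 0 [] le_rfl,
    if_pos (show PySem.Int.mod (0:Int) 2 = 0 by decide)]
  obtain ⟨hr1, hr2⟩ := pvRev s.toList
  by_cases hn : s.toList.length % 2 = 0
  · rw [if_pos ((pvParity s).mpr hn), hr1, hr2, if_pos hn, if_pos hn]
    simp [pvOdds]
  · rw [if_neg (fun h => hn ((pvParity s).mp h)), hr1, hr2, if_neg hn, if_neg hn]
    simp [pvOdds]
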